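-- pv_equiv track=rewrite | github.com/yan073/Aquaria-Tagger | tagtrials/tag.py | create_key_link
-- ===== SOURCE A (Python) =====
-- def create_key_link(name, keys):
--     links = []
--     if name == 'protein':
--         for k in keys:
--             url =  '<a href=\"https://aquaria.ws/' +  k + '\">Aquaria</a>'
--             links.append(url)
--     elif name == 'pdb':
--         for k in keys:
--             url =  '<a href=\"https://www.rcsb.org/ligand/' +  k + '\">PDB</a>'
--             links.append(url)
--     elif name == 'chembl':
--         for k in keys:
--             url =  '<a href=\"https://www.ebi.ac.uk/chembl/compound_report_card/' +  k + '/\">ChEMBL</a>'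
--             links.append(url)
--     elif name == 'pubchem':
--         for k in keys:
--             url =  '<a href=\"https://pubchem.ncbi.nlm.nih.gov/compound/' +  k + '\">PubChem</a>'
--             links.append(url)
--     return links
-- ===== SOURCE B (Python) =====
-- def _render(name, key):
--     """Render one key's link, or None if the database name is unknown."""
--     if name == 'protein':
--         return '<a href="https://aquaria.ws/%s">Aquaria</a>' % key
--     if name == 'pdb':
--         return '<a href="https://www.rcsb.org/ligand/%s">PDB</a>' % key
--     if name == 'chembl':
--         return '<a href="https://www.ebi.ac.uk/chembl/compound_report_card/%s/">ChEMBL</a>' % key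
--     if name == 'pubchem':
--         return '<a href="https://pubchem.ncbi.nlm.nih.gov/compound/%s">PubChem</a>' % key
--     return None
--
-- def create_key_link(name, keys):
--     if not keys:
--         return []
--     first = _render(name, keys[0])
--     if first is None:
--         return []
--     return [first] + create_key_link(name, keys[1:])
-- ===== Notes on version B (the rewrite author's own statement) =====
-- stated objective: alternative
-- what changed: Replaced A's per-name branching with a loop in each branch by structural recursion over the key list driven by a per-key Optional renderer (None short-circuits to []), building the result by cons instead of append.
import Mathlib
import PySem

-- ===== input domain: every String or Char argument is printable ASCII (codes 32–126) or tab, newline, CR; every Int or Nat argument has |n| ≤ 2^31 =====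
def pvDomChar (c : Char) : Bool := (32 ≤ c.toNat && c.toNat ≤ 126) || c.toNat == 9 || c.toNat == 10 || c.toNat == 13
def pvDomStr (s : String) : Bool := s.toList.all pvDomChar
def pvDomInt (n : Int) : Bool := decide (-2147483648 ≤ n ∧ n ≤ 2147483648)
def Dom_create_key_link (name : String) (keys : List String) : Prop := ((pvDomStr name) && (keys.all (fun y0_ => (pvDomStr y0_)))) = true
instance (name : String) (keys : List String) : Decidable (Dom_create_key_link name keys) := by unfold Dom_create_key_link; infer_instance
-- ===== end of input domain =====

-- B replaces A's per-name if/elif branches (each with its own append loop) by structural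
-- recursion over the key list driven by a per-key Optional renderer (alternative decomposition).

-- ===== PORT A =====
def create_key_link (name : String) (keys : List String) : List String :=
  let links : List String := []
  if name == "protein" then
    keys.foldl (fun links k =>
      let url := "<a href=\"https://aquaria.ws/" ++ k ++ "\">Aquaria</a>"
      links ++ [url]) links
  else if name == "pdb" then
    keys.foldl (fun links k =>
      let url := "<a href=\"https://www.rcsb.org/ligand/" ++ k ++ "\">PDB</a>"
      links ++ [url]) links
  else if name == "chembl" then
    keys.foldl (fun links k =>
      let url := "<a href=\"https://www.ebi.ac.uk/chembl/compound_report_card/" ++ k ++ "/\">ChEMBL</a>"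
      links ++ [url]) links
  else if name == "pubchem" then
    keys.foldl (fun links k =>
      let url := "<a href=\"https://pubchem.ncbi.nlm.nih.gov/compound/" ++ k ++ "\">PubChem</a>"
      links ++ [url]) links
  else links

-- ===== PORT B =====
-- '%s'-formatting with a single %s and no other % in the format string is exactly
-- prefix ++ key ++ suffix, so it is ported as concatenation.
def pvRender (name key : String) : Option String :=
  if name == "protein" then
    some ("<a href=\"https://aquaria.ws/" ++ key ++ "\">Aquaria</a>")
  else if name == "pdb" then
    some ("<a href=\"https://www.rcsb.org/ligand/" ++ key ++ "\">PDB</a>")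
  else if name == "chembl" then
    some ("<a href=\"https://www.ebi.ac.uk/chembl/compound_report_card/" ++ key ++ "/\">ChEMBL</a>")
  else if name == "pubchem" then
    some ("<a href=\"https://pubchem.ncbi.nlm.nih.gov/compound/" ++ key ++ "\">PubChem</a>")
  else none

def create_key_link_alt (name : String) (keys : List String) : List String :=
  match keys with
  | [] => []
  | k :: rest =>
    match pvRender name k with
    | none => []
    | some first => first :: create_key_link_alt name rest

-- ===== PRECONDITION & SPEC =====
def Spec_create_key_link (name : String) (keys : List String) (out : List String) : Prop := out = create_key_link_alt name keys
instance (name : String) (keys : List String) (out : List String) : Decidable (Spec_create_key_link name keys out) := by unfold Spec_create_key_link; infer_instance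

-- ===== CLAIM (what is proved, stated in full; the proofs are below) =====
def Claim_equal_create_key_link : Prop := ∀ (name : String) (keys : List String), Dom_create_key_link name keys → Spec_create_key_link name keys (create_key_link name keys)

-- ===== LEMMAS AND PROOFS =====
theorem flatten_map_singleton {α β : Type} (f : α → β) (keys : List α) :
    (keys.map (fun k => [f k])).flatten = keys.map f := by
  induction keys with
  | nil => rfl
  | cons k ks ih => simp [ih]

theorem foldl_append_map {α β : Type} (f : α → β) (keys : List α) (acc : List β) :
    keys.foldl (fun links k => links ++ [f k]) acc = acc ++ keys.map f := by
  induction keys generalizing acc with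
  | nil => simp
  | cons k ks ih => simp [List.foldl, ih]

theorem alt_map_of_render {name : String} {f : String → String}
    (h : ∀ k, pvRender name k = some (f k)) (keys : List String) :
    create_key_link_alt name keys = keys.map f := by
  induction keys with
  | nil => rfl
  | cons k ks ih => simp [create_key_link_alt, h k, ih]

theorem alt_nil_of_render {name : String}
    (h : ∀ k, pvRender name k = none) (keys : List String) :
    create_key_link_alt name keys = [] := by
  cases keys with
  | nil => rfl
  | cons k ks => simp [create_key_link_alt, h k]

-- ===== VERDICT (by name: the statement is the Claim_ definition above) =====
theorem create_key_link_spec : Claim_equal_create_key_link := by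
  intro name keys _
  unfold Spec_create_key_link create_key_link
  by_cases h1 : name = "protein"
  · simp [h1, foldl_append_map, flatten_map_singleton,
      alt_map_of_render (name := "protein")
        (f := fun k => "<a href=\"https://aquaria.ws/" ++ k ++ "\">Aquaria</a>")
        (fun k => rfl)]
  · by_cases h2 : name = "pdb"
    · simp [h1, h2, foldl_append_map, flatten_map_singleton,
        alt_map_of_render (name := "pdb")
          (f := fun k => "<a href=\"https://www.rcsb.org/ligand/" ++ k ++ "\">PDB</a>")
          (fun k => rfl)]
    · by_cases h3 : name = "chembl"
      · simp [h1, h2, h3, foldl_append_map, flatten_map_singleton,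
          alt_map_of_render (name := "chembl")
            (f := fun k => "<a href=\"https://www.ebi.ac.uk/chembl/compound_report_card/" ++ k ++ "/\">ChEMBL</a>")
            (fun k => rfl)]
      · by_cases h4 : name = "pubchem"
        · simp [h1, h2, h3, h4, foldl_append_map, flatten_map_singleton,
            alt_map_of_render (name := "pubchem")
              (f := fun k => "<a href=\"https://pubchem.ncbi.nlm.nih.gov/compound/" ++ k ++ "\">PubChem</a>")
              (fun k => rfl)]
        · simp [h1, h2, h3, h4,
            alt_nil_of_render (name := name) (fun k => by simp [pvRender, h1, h2, h3, h4])]
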